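-- pv_equiv track=rewrite | github.com/PlusMinusAnd/Competitions | Drug/_05/00_utils/smiles_tokenizer.py | encode_smiles
-- ===== SOURCE A (Python) =====
-- def encode_smiles(smiles_list, stoi, max_len):
--     encoded = []
--     for smiles in smiles_list:
--         ids = [stoi.get(ch, 0) for ch in smiles]  # 없는 char는 0으로
--         if len(ids) < max_len:
--             ids += [0] * (max_len - len(ids))
--         else:
--             ids = ids[:max_len]
--         encoded.append(ids)
--     return encoded
-- ===== SOURCE B (Python) =====
-- def encode_smiles(smiles_list, stoi, max_len):
--     return [
--         [stoi.get(s[i], 0) if i < len(s) else 0 for i in range(max_len)]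
--         for s in smiles_list
--     ]
-- ===== Notes on version B (the rewrite author's own statement) =====
-- stated objective: simpler
-- what changed: Replaces the two-phase encode-whole-string then branch-to-pad-or-slice with a single comprehension over the max_len output slots, reading s[i] when i < len(s) and 0 otherwise, so truncation and padding disappear as separate steps.
-- outside the precondition, e.g. on encode_smiles(['ab'], {'a': 1}, -1): A returns [[1]], B returns [[]]
import Mathlib
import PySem

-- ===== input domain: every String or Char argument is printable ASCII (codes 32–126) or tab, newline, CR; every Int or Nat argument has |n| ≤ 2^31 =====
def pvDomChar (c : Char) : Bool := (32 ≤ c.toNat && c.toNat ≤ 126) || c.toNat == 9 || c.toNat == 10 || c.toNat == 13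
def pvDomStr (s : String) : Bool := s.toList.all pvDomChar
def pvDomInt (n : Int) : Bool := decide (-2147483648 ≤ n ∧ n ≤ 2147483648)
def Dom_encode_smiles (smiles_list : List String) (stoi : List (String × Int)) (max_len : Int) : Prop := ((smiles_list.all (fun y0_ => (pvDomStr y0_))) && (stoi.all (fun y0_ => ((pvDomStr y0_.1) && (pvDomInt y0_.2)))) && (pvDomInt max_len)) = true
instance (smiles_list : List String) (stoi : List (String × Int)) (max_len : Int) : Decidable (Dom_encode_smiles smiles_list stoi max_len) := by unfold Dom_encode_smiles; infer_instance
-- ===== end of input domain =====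

-- B builds each row with a single comprehension over the max_len output slots (s[i] if in range, else 0),
-- instead of A's encode-whole-string followed by a pad-or-slice branch; same cost, simpler shape.

-- ===== PORT A =====
-- stoi.get(ch, 0): dict lookup with default (ch is the one-character string of c)
def pvLookup (stoi : List (String × Int)) (c : Char) : Int :=
  PySem.Dict.getD (PySem.Dict.ofList stoi) (String.ofList [c]) 0

def encode_smiles (smiles_list : List String) (stoi : List (String × Int)) (max_len : Int) : List (List Int) :=
  smiles_list.foldl (fun encoded smiles =>
    let ids := smiles.toList.map (fun ch => pvLookup stoi ch)
    let ids2 := if ((ids.length : Int) < max_len) then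
        ids ++ List.replicate (max_len - (ids.length : Int)).toNat 0
      else PySem.List.slice ids none (some max_len)
    encoded ++ [ids2]) []

-- ===== PORT B =====
def encode_smiles_alt (smiles_list : List String) (stoi : List (String × Int)) (max_len : Int) : List (List Int) :=
  smiles_list.map (fun s =>
    (PySem.List.pyRange 0 max_len 1).map (fun i =>
      if i < PySem.Str.len s then pvLookup stoi (PySem.List.pyGetD s.toList i ' ') else 0))

-- ===== PRECONDITION & SPEC =====
-- Pre_ excludes inputs with a negative max_len together with some string longer than |max_len| —
-- outside the natural domain of a fixed-length encoder — where A's slice ids[:max_len] accidentally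
-- drops the last |max_len| codes while B's empty slot range gives an empty row: neither value is
-- specified, both are artefacts of the formulation.
def Pre_encode_smiles (smiles_list : List String) (stoi : List (String × Int)) (max_len : Int) : Prop :=
  0 ≤ max_len ∨ ∀ s ∈ smiles_list, PySem.Str.len s ≤ -max_len
instance (smiles_list : List String) (stoi : List (String × Int)) (max_len : Int) : Decidable (Pre_encode_smiles smiles_list stoi max_len) := by unfold Pre_encode_smiles; infer_instance

def pvWitness_encode_smiles : List String × (List (String × Int)) × Int :=
  (["ab", "cc"], [("a", 1), ("b", 2)], 3)

def Spec_encode_smiles (smiles_list : List String) (stoi : List (String × Int)) (max_len : Int) (out : List (List Int)) : Prop := out = encode_smiles_alt smiles_list stoi max_len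
instance (smiles_list : List String) (stoi : List (String × Int)) (max_len : Int) (out : List (List Int)) : Decidable (Spec_encode_smiles smiles_list stoi max_len out) := by unfold Spec_encode_smiles; infer_instance

-- ===== CLAIM (what is proved, stated in full; the proofs are below) =====
def Claim_equal_encode_smiles : Prop := ∀ (smiles_list : List String) (stoi : List (String × Int)) (max_len : Int), Dom_encode_smiles smiles_list stoi max_len → Pre_encode_smiles smiles_list stoi max_len → Spec_encode_smiles smiles_list stoi max_len (encode_smiles smiles_list stoi max_len)

-- ===== LEMMAS AND PROOFS =====

-- one row: A's encode-then-pad/slice equals B's slot loop, for a nonnegative length n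
lemma pv_row_eq (stoi : List (String × Int)) (cs : List Char) (n : Nat) :
    (if (((cs.map (fun ch => pvLookup stoi ch)).length : Int) < (n : Int)) then
        cs.map (fun ch => pvLookup stoi ch) ++
          List.replicate ((n : Int) - ((cs.map (fun ch => pvLookup stoi ch)).length : Int)).toNat 0
      else PySem.List.slice (cs.map (fun ch => pvLookup stoi ch)) none (some (n : Int)))
    = (PySem.List.pyRange 0 (n : Int) 1).map
        (fun i => if i < (cs.length : Int) then pvLookup stoi (PySem.List.pyGetD cs i ' ') else 0) := by
  apply List.ext_getElem
  · split_ifs with h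
    · simp only [List.length_map, Nat.cast_lt] at h
      simp only [List.length_append, List.length_map, List.length_replicate,
        PySem.List.length_pyRange_one]
      omega
    · simp only [List.length_map, Nat.cast_lt, not_lt] at h
      simp only [PySem.List.slice_to_natCast, List.length_take, List.length_map,
        PySem.List.length_pyRange_one]
      omega
  · intro k h1 h2
    have hk : k < n := by
      simpa [PySem.List.length_pyRange_one] using h2
    split_ifs with h
    · simp only [List.length_map, Nat.cast_lt] at h
      simp only [List.getElem_map, PySem.List.getElem_pyRange_one, zero_add]
      by_cases hkl : k < cs.length
      · rw [List.getElem_append_left (by simpa using hkl)]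
        simp [hkl, PySem.List.pyGetD_natCast]
      · rw [List.getElem_append_right (by simpa using hkl)]
        simp [hkl]
    · simp only [List.length_map, Nat.cast_lt, not_lt] at h
      have hkl : k < cs.length := lt_of_lt_of_le hk h
      simp only [PySem.List.slice_to_natCast, List.getElem_take, List.getElem_map, PySem.List.getElem_pyRange_one, zero_add]
      simp [hkl, PySem.List.pyGetD_natCast]

-- negative max_len with every string no longer than |max_len|: both sides give the empty row
lemma pv_row_neg (stoi : List (String × Int)) (cs : List Char) (max_len : Int)
    (hneg : max_len < 0) (hlen : (cs.length : Int) ≤ -max_len) :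
    (if (((cs.map (fun ch => pvLookup stoi ch)).length : Int) < max_len) then
        cs.map (fun ch => pvLookup stoi ch) ++
          List.replicate (max_len - ((cs.map (fun ch => pvLookup stoi ch)).length : Int)).toNat 0
      else PySem.List.slice (cs.map (fun ch => pvLookup stoi ch)) none (some max_len))
    = (PySem.List.pyRange 0 max_len 1).map
        (fun i => if i < (cs.length : Int) then pvLookup stoi (PySem.List.pyGetD cs i ' ') else 0) := by
  rw [PySem.List.pyRange_one_eq_nil (by omega), List.map_nil]
  rw [if_neg (by simp; omega)]
  have hk : max_len = -(((-max_len).toNat : Nat) : Int) := by omega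
  rw [hk, PySem.List.slice_to_neg_natCast _ ((-max_len).toNat) (by omega)]
  simp
  left
  omega

-- ===== VERDICT (by name: the statement is the Claim_ definition above) =====
theorem encode_smiles_spec : Claim_equal_encode_smiles := by
  intro smiles_list stoi max_len _ hpre
  unfold Spec_encode_smiles encode_smiles encode_smiles_alt
  rw [PySem.List.foldl_append_singleton_eq_map]
  apply List.map_congr_left
  intro s hs
  by_cases hml : 0 ≤ max_len
  · obtain ⟨n, rfl⟩ : ∃ n : Nat, max_len = (n : Int) := ⟨max_len.toNat, (Int.toNat_of_nonneg hml).symm⟩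
    simpa using pv_row_eq stoi s.toList n
  · have hml' : max_len < 0 := by omega
    have hlen : (s.toList.length : Int) ≤ -max_len := by
      rcases hpre with h | h
      · omega
      · simpa [PySem.Str.len] using h s hs
    simpa using pv_row_neg stoi s.toList max_len hml' hlen
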